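-- pv_equiv track=rewrite | github.com/privacy97/Programmers_Python | 프로그래머스/lv1/82612. 부족한 금액 계산하기/부족한 금액 계산하기.py | solution
-- ===== SOURCE A (Python) =====
-- def solution(price, money, count):
--
--     answer = 0
--
--     for i in range(1, count+1):
--         answer += price*i
--
--     answer = answer - money
--     if answer < 0:
--         answer = 0
--
--     return answer
-- ===== SOURCE B (Python) =====
-- def solution(price, money, count):
--     # Closed-form Gauss sum instead of a loop: total cost = price * count*(count+1)/2.
--     return max(0, price * count * (count + 1) // 2 - money)
-- ===== Notes on version B (the rewrite author's own statement) =====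
-- stated objective: faster
-- what changed: Replaces the O(count) accumulation loop with the closed-form arithmetic-series formula price*count*(count+1)//2 and a max with 0.
-- outside the precondition, e.g. on solution(5, 0, -2): A returns 0, B returns 5
import Mathlib
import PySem

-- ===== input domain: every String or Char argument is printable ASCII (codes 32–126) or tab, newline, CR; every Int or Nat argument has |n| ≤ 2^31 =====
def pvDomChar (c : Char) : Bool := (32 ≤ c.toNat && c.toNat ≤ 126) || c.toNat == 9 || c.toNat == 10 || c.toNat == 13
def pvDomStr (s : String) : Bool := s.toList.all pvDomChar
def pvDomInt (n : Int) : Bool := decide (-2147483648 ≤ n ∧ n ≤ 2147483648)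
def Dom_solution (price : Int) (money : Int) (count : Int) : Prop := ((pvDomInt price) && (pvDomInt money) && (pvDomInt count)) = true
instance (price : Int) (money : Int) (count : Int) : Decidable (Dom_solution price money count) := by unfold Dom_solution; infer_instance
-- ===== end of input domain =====

-- B replaces A's O(count) accumulation loop with the closed-form Gauss sum (faster, O(1)).

-- ===== PORT A =====
def solution (price : Int) (money : Int) (count : Int) : Int :=
  let answer := (PySem.List.pyRange 1 (count + 1) 1).foldl (fun a i => a + price * i) 0
  let answer := answer - money
  if answer < 0 then 0 else answer

-- ===== PORT B =====
def solution_alt (price : Int) (money : Int) (count : Int) : Int :=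
  max 0 (PySem.Int.floordiv (price * count * (count + 1)) 2 - money)

-- ===== PRECONDITION & SPEC =====
-- Pre_ restricts to count ≥ -1 (at count ≤ -2, outside the natural domain of a rental count,
-- A's empty-range result is an artefact the closed form does not reproduce).
def Pre_solution (price : Int) (money : Int) (count : Int) : Prop := -1 ≤ count
instance (price : Int) (money : Int) (count : Int) : Decidable (Pre_solution price money count) := by unfold Pre_solution; infer_instance
def pvWitness_solution : Int × Int × Int := (3, 20, 4)
def Spec_solution (price : Int) (money : Int) (count : Int) (out : Int) : Prop := out = solution_alt price money count
instance (price : Int) (money : Int) (count : Int) (out : Int) : Decidable (Spec_solution price money count out) := by unfold Spec_solution; infer_instance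

-- ===== CLAIM (what is proved, stated in full; the proofs are below) =====
def Claim_equal_solution : Prop := ∀ (price : Int) (money : Int) (count : Int), Dom_solution price money count → Pre_solution price money count → Spec_solution price money count (solution price money count)

-- ===== LEMMAS AND PROOFS =====

lemma sum_loop_closed (price : Int) (n : Nat) :
    2 * (PySem.List.pyRange 1 ((n : Int) + 1) 1).foldl (fun a i => a + price * i) 0
      = price * n * (n + 1) := by
  induction n with
  | zero =>
      simp only [Nat.cast_zero, zero_add]
      rw [PySem.List.pyRange_one_eq_nil le_rfl]
      simp
  | succ k ih =>
      have h : (1:Int) ≤ (k : Int) + 1 := by omega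
      have : ((k + 1 : Nat) : Int) + 1 = ((k : Int) + 1) + 1 := by push_cast; ring
      rw [this, PySem.List.pyRange_one_succ_right h, List.foldl_append]
      simp only [List.foldl]
      push_cast
      push_cast at ih
      nlinarith [ih]

-- ===== VERDICT (by name: the statement is the Claim_ definition above) =====
theorem solution_spec : Claim_equal_solution := by
  intro price money count _ hpre
  unfold Spec_solution solution solution_alt
  rw [PySem.Int.floordiv_eq_ediv_of_pos (by norm_num)]
  rcases eq_or_lt_of_le hpre with hneg | hpos
  · -- count = -1: the range is empty and the closed-form sum is 0
    rw [← hneg]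
    rw [PySem.List.pyRange_one_eq_nil (by norm_num)]
    simp only [List.foldl]
    omega
  · obtain ⟨n, rfl⟩ : ∃ n : Nat, count = (n : Int) :=
      ⟨count.toNat, (Int.toNat_of_nonneg (by omega)).symm⟩
    have h := sum_loop_closed price n
    simp only []
    omega
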